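-- pv_equiv track=rewrite | github.com/mmmudmi/Introduction-to-Computer-Programming | Assignment 6/karma.py | keepTabs
-- ===== SOURCE A (Python) =====
-- def list_to_str(l):
--     s = ''
--     for i in l:
--         s+=i
--     return s
--
-- def transfer(n): #"John->Jeff"
--     n = list(n)
--     first = []
--     m = []
--     i = 0
--     while i < len(n): #"John->Jeff"
--         if n[i] == '-':
--             n = n[i+2:]
--             break
--         else:
--             first.append(n[i])
--             i+=1
--     second = n
--     f = ''
--     for i in first:
--         f += i
--     s = ''
--     for i in second:
--         s += i
--     return [f,s] #['John', 'Jeff']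
--
-- def keepTabs(actions: list[str]) -> dict[str, int]:
--     karma = dict()
--     for i in actions:
--         if '--' in i:
--             i = list(i)[:-2]
--             i = list_to_str(i)
--             if i in karma:
--                 karma[i] -= 1
--             else:
--                 karma[i] = -1
--         elif '++' in i:
--             i = list(i)[:-2]
--             i = list_to_str(i)
--             if i in karma:
--                 karma[i] += 1
--             else:
--                 karma[i] = 1
--         elif '->' in i:
--             x,y = transfer(i)
--             if x in karma:
--                 if y in karma:
--                     karma[y] += karma[x]
--                     karma[x] = 0
--                 else:
--                     karma[y] = karma[x]
--                     karma[x] = 0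
--         will_delete = []
--         for i,j in karma.items():
--             if j == 0:
--                 will_delete.append(i)
--         for d in will_delete:
--             del karma[d]
--     return karma
-- ===== SOURCE B (Python) =====
-- def _bump(karma, k, delta):
--     nv = karma.get(k, 0) + delta
--     if nv:
--         karma[k] = nv
--     else:
--         karma.pop(k, None)
--
-- def keepTabs(actions: list[str]) -> dict[str, int]:
--     karma = {}
--     for a in actions:
--         if '--' in a:
--             _bump(karma, a[:-2], -1)
--         elif '++' in a:
--             _bump(karma, a[:-2], 1)
--         elif '->' in a:
--             p = a.find('-')
--             x, y = a[:p], a[p + 2:]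
--             v = karma.get(x, 0)
--             if v:
--                 _bump(karma, y, v)
--                 karma.pop(x, None)
--     return karma
-- ===== Notes on version B (the rewrite author's own statement) =====
-- stated objective: simpler
-- what changed: B parses each action with slicing/str.find instead of A's hand-rolled character loops (list_to_str, transfer's while-scan) and keeps the dict zero-free in place - a key is deleted the moment its value reaches zero - so A's per-action full-dictionary rescan-and-delete pass disappears.
import Mathlib
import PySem

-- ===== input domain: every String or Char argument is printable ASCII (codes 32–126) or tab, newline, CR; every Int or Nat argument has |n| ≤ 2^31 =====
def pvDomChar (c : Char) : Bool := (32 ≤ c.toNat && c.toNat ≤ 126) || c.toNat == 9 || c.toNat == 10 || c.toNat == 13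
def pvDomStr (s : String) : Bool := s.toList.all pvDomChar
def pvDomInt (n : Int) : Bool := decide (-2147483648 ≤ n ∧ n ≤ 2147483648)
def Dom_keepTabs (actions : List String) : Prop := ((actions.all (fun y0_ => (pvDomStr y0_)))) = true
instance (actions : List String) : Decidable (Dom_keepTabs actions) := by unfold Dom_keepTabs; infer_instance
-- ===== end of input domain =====

-- B replaces A's per-action full-dictionary zero-rescan (and its hand-rolled character loops) by
-- direct slicing/find parsing and an in-place update that deletes a key the moment its value hits zero.

-- ===== PORT A =====

-- s = ''; for i in l: s += i   (character-level concatenation, exact)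
def list_to_str (l : List Char) : String := String.ofList (l.foldl (fun s c => s ++ [c]) [])

-- the while-loop of transfer: scan for the first '-', break with n = n[i+2:]
def transferGo (n : List Char) (first : List Char) (i : Nat) : List Char × List Char :=
  if h : i < n.length then
    if n[i] = '-' then (first, n.drop (i + 2))
    else transferGo n (first ++ [n[i]]) (i + 1)
  else (first, n)
termination_by n.length - i

def transfer (s : String) : String × String :=
  let fs := transferGo s.toList [] 0
  (list_to_str fs.1, list_to_str fs.2)

-- the trailing per-action cleanup: collect zero-valued keys, then delete them
def pruneA (karma : PySem.Dict String Int) : PySem.Dict String Int :=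
  let willDelete := karma.items.foldl (fun acc p => if p.2 = 0 then acc ++ [p.1] else acc) []
  willDelete.foldl (fun d k => d.erase k) karma

def stepA (karma : PySem.Dict String Int) (i : String) : PySem.Dict String Int :=
  let karma' :=
    if PySem.Str.isIn "--" i then
      let k := list_to_str (PySem.List.slice i.toList none (some (-2)))
      if karma.contains k then karma.insert k (karma.getD k 0 - 1) else karma.insert k (-1)
    else if PySem.Str.isIn "++" i then
      let k := list_to_str (PySem.List.slice i.toList none (some (-2)))
      if karma.contains k then karma.insert k (karma.getD k 0 + 1) else karma.insert k 1
    else if PySem.Str.isIn "->" i then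
      let xy := transfer i
      if karma.contains xy.1 then
        if karma.contains xy.2 then
          (karma.insert xy.2 (karma.getD xy.2 0 + karma.getD xy.1 0)).insert xy.1 0
        else (karma.insert xy.2 (karma.getD xy.1 0)).insert xy.1 0
      else karma
    else karma
  pruneA karma'

def keepTabs (actions : List String) : List (String × Int) :=
  (actions.foldl stepA PySem.Dict.empty).items

-- ===== PORT B =====

def bump (karma : PySem.Dict String Int) (k : String) (delta : Int) : PySem.Dict String Int :=
  let nv := karma.getD k 0 + delta
  if nv = 0 then karma.erase k else karma.insert k nv

def stepB (karma : PySem.Dict String Int) (a : String) : PySem.Dict String Int :=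
  if PySem.Str.isIn "--" a then bump karma (PySem.Str.slice a none (some (-2))) (-1)
  else if PySem.Str.isIn "++" a then bump karma (PySem.Str.slice a none (some (-2))) 1
  else if PySem.Str.isIn "->" a then
    let p := PySem.Str.find a "-"
    let x := PySem.Str.slice a none (some p)
    let y := PySem.Str.slice a (some (p + 2)) none
    let v := karma.getD x 0
    if v ≠ 0 then (bump karma y v).erase x else karma
  else karma

def keepTabs_alt (actions : List String) : List (String × Int) :=
  (actions.foldl stepB PySem.Dict.empty).items

-- ===== PRECONDITION & SPEC =====
def Spec_keepTabs (actions : List String) (out : List (String × Int)) : Prop := out = keepTabs_alt actions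
instance (actions : List String) (out : List (String × Int)) : Decidable (Spec_keepTabs actions out) := by unfold Spec_keepTabs; infer_instance

-- ===== CLAIM (what is proved, stated in full; the proofs are below) =====
def Claim_equal_keepTabs : Prop := ∀ (actions : List String), Dom_keepTabs actions → Spec_keepTabs actions (keepTabs actions)

-- ===== LEMMAS AND PROOFS =====

def NoZero (d : PySem.Dict String Int) : Prop := ∀ p ∈ d.items, p.2 ≠ 0

lemma noZero_empty : NoZero PySem.Dict.empty := by
  intro p hp; simp [PySem.Dict.empty] at hp

lemma foldl_erase_items (ks : List String) (d : PySem.Dict String Int) :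
    (ks.foldl (fun d k => d.erase k) d).items = d.items.filter (fun p => !ks.contains p.1) := by
  induction ks generalizing d with
  | nil => simp
  | cons k rest ih =>
      rw [List.foldl_cons, ih, PySem.Dict.erase, List.filter_filter]
      apply List.filter_congr
      intro p _
      simp [Bool.not_or, Bool.and_comm, beq_eq_decide]

lemma prune_eq (d : PySem.Dict String Int) (hnd : d.keys.Nodup) :
    pruneA d = PySem.Dict.mk (d.items.filter (fun p => !(p.2 == 0))) := by
  unfold pruneA
  simp only [PySem.List.foldl_append_ite (fun (p : String × Int) => p.2 = 0) (fun p => p.1)]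
  apply PySem.Dict.ext
  rw [foldl_erase_items]
  simp only [List.nil_append]
  apply List.filter_congr
  intro p hp
  simp only [List.contains_eq_mem]
  congr 1
  rw [beq_eq_decide, decide_eq_decide]
  simp only [List.mem_map, List.mem_filter, decide_eq_true_eq]
  constructor
  · rintro ⟨q, ⟨hq, hq0⟩, hqk⟩
    have hq' : q = p := List.inj_on_of_nodup_map hnd hq hp hqk
    rw [← hq']; exact hq0
  · intro h0
    exact ⟨p, ⟨hp, h0⟩, rfl⟩




lemma aux_map_filter (l : List (String × Int)) (k : String) :
    (l.map (fun p => if p.1 == k then (k, (0:Int)) else p)).filter (fun p => !(p.2 == 0)) =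
      (l.filter (fun p => !(p.2 == 0))).filter (fun p => !(p.1 == k)) := by
  induction l with
  | nil => rfl
  | cons p t ih =>
      by_cases hpk : p.1 = k
      · by_cases hz : p.2 = 0 <;>
          (simp [hpk, hz, List.filter_filter] at ih ⊢; try exact ih)
      · by_cases hz : p.2 = 0 <;>
          (simp [hpk, hz, List.filter_filter] at ih ⊢; try exact ih)

lemma insert_zero_items_filter (d : PySem.Dict String Int) (k : String) :
    ((d.insert k 0).items).filter (fun p => !(p.2 == 0)) =
      (d.items.filter (fun p => !(p.2 == 0))).filter (fun p => !(p.1 == k)) := by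
  by_cases hc : d.contains k = true
  · rw [PySem.Dict.items_insert_of_contains _ _ hc, aux_map_filter]
  · rw [PySem.Dict.items_insert_of_not_contains _ _ (by simpa using hc)]
    have hnk : ∀ p ∈ d.items, ¬ (p.1 = k) := by
      intro p hp hpk
      apply hc
      unfold PySem.Dict.contains
      rw [List.any_eq_true]
      exact ⟨p, hp, by simp [hpk]⟩
    rw [List.filter_append, List.filter_filter]
    simp only [List.filter_cons, List.filter_nil]
    norm_num
    apply List.filter_congr
    intro p hp
    simp [hnk p hp]


lemma getD_ne_zero_iff_contains (d : PySem.Dict String Int) (h : NoZero d) (k : String) :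
    d.getD k 0 ≠ 0 ↔ d.contains k = true := by
  unfold PySem.Dict.getD PySem.Dict.get? PySem.Dict.contains
  cases hfind : List.find? (fun p => p.1 == k) d.items with
  | none =>
      simp only [Option.map_none, Option.getD_none]
      constructor
      · intro h0; exact absurd rfl h0
      · intro hany
        rw [List.any_eq_true] at hany
        obtain ⟨p, hp, hpk⟩ := hany
        rw [List.find?_eq_none] at hfind
        exact absurd hpk (by simpa using hfind p hp)
  | some q =>
      simp only [Option.map_some, Option.getD_some]
      constructor
      · intro _
        rw [List.any_eq_true]
        have hqk := List.find?_some (p := fun (p : String × Int) => p.1 == k) hfind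
        exact ⟨q, List.mem_of_find?_eq_some hfind, hqk⟩
      · intro _
        exact h q (List.mem_of_find?_eq_some hfind)

lemma singleton_prefix_iff (c : Char) (l : List Char) : [c] <+: l ↔ l.head? = some c := by
  cases l with
  | nil => simp
  | cons x t => simp [List.cons_prefix_cons, eq_comm]

lemma transferGo_spec (cs : List Char) (p : Nat) (hp : p < cs.length) (hc : cs[p] = '-')
    (hfirst : ∀ j, j < p → cs[j]? ≠ some '-') :
    ∀ n i acc, i ≤ p → p - i = n →
      transferGo cs acc i = (acc ++ ((cs.drop i).take (p - i)), cs.drop (p + 2)) := by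
  intro n
  induction n with
  | zero =>
      intro i acc hi hni
      have : i = p := by omega
      subst this
      unfold transferGo
      rw [dif_pos hp, if_pos hc]
      simp
  | succ m ih =>
      intro i acc hi hni
      have hip : i < p := by omega
      have hilen : i < cs.length := by omega
      have hne : cs[i] ≠ '-' := by
        have := hfirst i hip
        simpa [List.getElem?_eq_getElem hilen] using this
      unfold transferGo
      rw [dif_pos hilen, if_neg hne]
      rw [ih (i + 1) (acc ++ [cs[i]]) (by omega) (by omega)]
      rw [List.drop_eq_getElem_cons hilen]
      have : p - i = (p - (i + 1)) + 1 := by omega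
      rw [this, List.take_succ_cons]
      simp

lemma list_to_str_toList (l : List Char) : (list_to_str l).toList = l := by
  simp [list_to_str]
  induction l with
  | nil => rfl
  | cons c t iht => simp [iht]

lemma transfer_eq (a : String) (hin : PySem.Str.isIn "->" a = true) :
    transfer a = (PySem.Str.slice a none (some (PySem.Str.find a "-")),
                  PySem.Str.slice a (some (PySem.Str.find a "-" + 2)) none) := by
  have hdash : ("-").toList <:+: a.toList := by
    have h2 := (PySem.Str.isIn_iff_infix _ _).mp hin
    obtain ⟨pre, suf, hps⟩ := h2
    exact ⟨pre, '>' :: suf, by simpa using hps⟩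
  have hpos : 0 ≤ PySem.Str.find a "-" := (PySem.Str.find_nonneg_iff _ _).mpr hdash
  have hfind : PySem.Str.find a "-" = PySem.Chars.find a.toList ['-'] := by
    simp [PySem.Str.find_eq]
  set cs := a.toList with hcs
  set P := PySem.Chars.find cs ['-'] with hP
  have hpos' : 0 ≤ P := by rw [← hfind] at *; exact hpos
  obtain ⟨hpref, hmin⟩ := PySem.Chars.find_spec (s := cs) (sub := ['-']) hpos'
  set p := P.toNat with hp
  have hhead : (cs.drop p).head? = some '-' := (singleton_prefix_iff _ _).mp hpref
  have hplen : p < cs.length := by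
    by_contra h
    rw [List.drop_eq_nil_of_le (by omega)] at hhead
    simp at hhead
  have hcp : cs[p] = '-' := by
    have := List.head?_drop (l := cs) (i := p)
    rw [hhead] at this
    simp [List.getElem?_eq_getElem hplen] at this
    exact this.symm
  have hfirst : ∀ j, j < p → cs[j]? ≠ some '-' := by
    intro j hj habs
    apply hmin j hj
    rw [singleton_prefix_iff, List.head?_drop]
    exact habs
  have hgo := transferGo_spec cs p hplen hcp hfirst (p - 0) 0 [] (by omega) rfl
  unfold transfer
  rw [← hcs, hgo]
  simp only [List.drop_zero, Nat.sub_zero, List.nil_append]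
  have hx : list_to_str (cs.take p) = PySem.Str.slice a none (some (PySem.Str.find a "-")) := by
    apply String.toList_inj.mp
    rw [list_to_str_toList, PySem.Str.toList_slice, PySem.Chars.slice_eq_listSlice, ← hcs, hfind,
      PySem.List.slice_to _ hpos']
  have hy : list_to_str (cs.drop (p + 2)) =
      PySem.Str.slice a (some (PySem.Str.find a "-" + 2)) none := by
    apply String.toList_inj.mp
    rw [list_to_str_toList, PySem.Str.toList_slice, PySem.Chars.slice_eq_listSlice, ← hcs, hfind,
      PySem.List.slice_from _ (by omega)]
    congr 1
    omega
  rw [hx, hy]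




lemma erase_items (d : PySem.Dict String Int) (k : String) :
    (d.erase k).items = d.items.filter (fun p => !(p.1 == k)) := rfl

lemma noZero_filter_id (d : PySem.Dict String Int) (h : NoZero d) :
    d.items.filter (fun p => !(p.2 == 0)) = d.items := by
  apply List.filter_eq_self.mpr
  intro p hp
  simpa using h p hp

lemma noZero_insert (d : PySem.Dict String Int) (h : NoZero d) (k : String) {v : Int}
    (hv : v ≠ 0) : NoZero (d.insert k v) := by
  intro p hp
  rw [PySem.Dict.mem_items_insert] at hp
  rcases hp with h1 | h2
  · rw [h1]; exact hv
  · exact h p h2.1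

lemma noZero_erase (d : PySem.Dict String Int) (h : NoZero d) (k : String) :
    NoZero (d.erase k) := by
  intro p hp
  exact h p (List.mem_of_mem_filter hp)

lemma nodup_erase (d : PySem.Dict String Int) (h : d.keys.Nodup) (k : String) :
    (d.erase k).keys.Nodup := by
  unfold PySem.Dict.keys at *
  exact h.sublist (List.Sublist.map _ List.filter_sublist)

lemma prune_id (d : PySem.Dict String Int) (h1 : NoZero d) (h2 : d.keys.Nodup) :
    pruneA d = d := by
  rw [prune_eq d h2]
  apply PySem.Dict.ext
  exact noZero_filter_id d h1

lemma insert_then_prune (d : PySem.Dict String Int) (h1 : NoZero d) (h2 : d.keys.Nodup)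
    (k : String) (w : Int) :
    pruneA (d.insert k w) = if w = 0 then d.erase k else d.insert k w := by
  rw [prune_eq _ (PySem.Dict.nodup_keys_insert d k w h2)]
  by_cases hw : w = 0
  · subst hw
    rw [if_pos rfl]
    apply PySem.Dict.ext
    show _ = (d.erase k).items
    rw [insert_zero_items_filter, noZero_filter_id d h1, erase_items]
  · rw [if_neg hw]
    apply PySem.Dict.ext
    exact noZero_filter_id _ (noZero_insert d h1 k hw)

lemma double_insert_prune (d : PySem.Dict String Int) (h1 : NoZero d) (h2 : d.keys.Nodup)
    (x y : String) (w : Int) :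
    pruneA ((d.insert y w).insert x 0) =
      (if w = 0 then d.erase y else d.insert y w).erase x := by
  rw [prune_eq _ (PySem.Dict.nodup_keys_insert _ x 0
        (PySem.Dict.nodup_keys_insert d y w h2))]
  apply PySem.Dict.ext
  show ((d.insert y w).insert x 0).items.filter (fun p => !(p.2 == 0)) = _
  rw [insert_zero_items_filter (d.insert y w) x]
  by_cases hw : w = 0
  · subst hw
    rw [if_pos rfl, insert_zero_items_filter d y, noZero_filter_id d h1, erase_items,
      erase_items]
  · rw [if_neg hw, noZero_filter_id _ (noZero_insert d h1 y hw), erase_items]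

lemma key_eq (a : String) :
    list_to_str (PySem.List.slice a.toList none (some (-2))) = PySem.Str.slice a none (some (-2)) := by
  apply String.toList_inj.mp
  rw [list_to_str_toList, PySem.Str.toList_slice, PySem.Chars.slice_eq_listSlice]

lemma step_eq (d : PySem.Dict String Int) (h1 : NoZero d) (h2 : d.keys.Nodup) (a : String) :
    stepA d a = stepB d a := by
  simp only [stepA, stepB, key_eq]
  by_cases hmm : PySem.Str.isIn "--" a = true
  · rw [if_pos hmm, if_pos hmm]
    unfold bump
    by_cases hc : d.contains (PySem.Str.slice a none (some (-2))) = true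
    · rw [if_pos hc, sub_eq_add_neg, insert_then_prune d h1 h2 _ _]
    · rw [if_neg hc, insert_then_prune d h1 h2 _ (-1),
        PySem.Dict.getD_of_not_contains d 0 (by simpa using hc)]
      norm_num
  · rw [if_neg hmm, if_neg hmm]
    by_cases hpp : PySem.Str.isIn "++" a = true
    · rw [if_pos hpp, if_pos hpp]
      unfold bump
      by_cases hc : d.contains (PySem.Str.slice a none (some (-2))) = true
      · rw [if_pos hc, insert_then_prune d h1 h2 _ _]
      · rw [if_neg hc, insert_then_prune d h1 h2 _ 1,
          PySem.Dict.getD_of_not_contains d 0 (by simpa using hc)]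
        norm_num
    · rw [if_neg hpp, if_neg hpp]
      by_cases hio : PySem.Str.isIn "->" a = true
      · rw [if_pos hio, if_pos hio, transfer_eq a hio]
        dsimp only
        by_cases hx : d.contains (PySem.Str.slice a none (some (PySem.Str.find a "-"))) = true
        · have hvx := (getD_ne_zero_iff_contains d h1 _).mpr hx
          rw [if_pos hx, if_pos hvx]
          unfold bump
          by_cases hy : d.contains (PySem.Str.slice a (some (PySem.Str.find a "-" + 2)) none) = true
          · rw [if_pos hy, double_insert_prune d h1 h2 _ _ _]
          · rw [if_neg hy, PySem.Dict.getD_of_not_contains d (k := PySem.Str.slice a (some (PySem.Str.find a "-" + 2)) none) 0 (by simpa using hy), zero_add,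
              double_insert_prune d h1 h2 _ _ _]
        · have hvx : ¬ d.getD (PySem.Str.slice a none (some (PySem.Str.find a "-"))) 0 ≠ 0 := by
            intro h
            exact hx ((getD_ne_zero_iff_contains d h1 _).mp h)
          rw [if_neg hx, if_neg hvx]
          exact prune_id d h1 h2
      · rw [if_neg hio, if_neg hio]
        exact prune_id d h1 h2

lemma step_inv (d : PySem.Dict String Int) (h1 : NoZero d) (h2 : d.keys.Nodup) (a : String) :
    NoZero (stepB d a) ∧ (stepB d a).keys.Nodup := by
  have hbump : ∀ k δ, NoZero (bump d k δ) ∧ (bump d k δ).keys.Nodup := by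
    intro k δ
    unfold bump
    by_cases hz : d.getD k 0 + δ = 0
    · rw [if_pos hz]
      exact ⟨noZero_erase d h1 k, nodup_erase d h2 k⟩
    · rw [if_neg hz]
      exact ⟨noZero_insert d h1 k hz, PySem.Dict.nodup_keys_insert d k _ h2⟩
  simp only [stepB]
  split_ifs with hA hB hC hv
  · exact hbump _ _
  · exact hbump _ _
  · have hb := hbump (PySem.Str.slice a (some (PySem.Str.find a "-" + 2)) none) (d.getD (PySem.Str.slice a none (some (PySem.Str.find a "-"))) 0)
    exact ⟨noZero_erase _ hb.1 _, nodup_erase _ hb.2 _⟩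
  · exact ⟨h1, h2⟩
  · exact ⟨h1, h2⟩

lemma foldl_eq (actions : List String) (d : PySem.Dict String Int)
    (h1 : NoZero d) (h2 : d.keys.Nodup) :
    actions.foldl stepA d = actions.foldl stepB d := by
  induction actions generalizing d with
  | nil => rfl
  | cons a rest ih =>
      have := step_inv d h1 h2 a
      simp only [List.foldl_cons, step_eq d h1 h2 a]
      exact ih _ this.1 this.2

-- ===== VERDICT (by name: the statement is the Claim_ definition above) =====
theorem keepTabs_spec : Claim_equal_keepTabs := by
  intro actions _
  show keepTabs actions = keepTabs_alt actions
  unfold keepTabs keepTabs_alt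
  rw [foldl_eq actions PySem.Dict.empty noZero_empty (by simp [PySem.Dict.empty, PySem.Dict.keys])]
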